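-- pv_equiv track=rewrite | github.com/verbal/Lidarr-YouTube-Downloader | app.py | get_valid_release_id
-- ===== SOURCE A (Python) =====
-- def get_valid_release_id(album):
--     releases = album.get("releases", [])
--     if not releases:
--         return 0
--     for rel in releases:
--         if rel.get("monitored", False) and rel.get("id", 0) > 0:
--             return rel["id"]
--     for rel in releases:
--         if rel.get("id", 0) > 0:
--             return rel["id"]
--     return 0
-- ===== SOURCE B (Python) =====
-- def get_valid_release_id(album):
--     fallback = 0
--     for rel in album.get("releases", []):
--         rid = rel.get("id", 0)
--         if rel.get("monitored", False) and rid > 0: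
--             return rid
--         if fallback == 0 and rid > 0:
--             fallback = rid
--     return fallback
-- ===== Notes on version B (the rewrite author's own statement) =====
-- stated objective: simpler
-- what changed: Replaces A's two sequential scans (first for a monitored valid release, then for any valid release) with a single pass that returns a monitored valid id immediately while tracking the first valid id as a fallback.
import Mathlib
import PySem

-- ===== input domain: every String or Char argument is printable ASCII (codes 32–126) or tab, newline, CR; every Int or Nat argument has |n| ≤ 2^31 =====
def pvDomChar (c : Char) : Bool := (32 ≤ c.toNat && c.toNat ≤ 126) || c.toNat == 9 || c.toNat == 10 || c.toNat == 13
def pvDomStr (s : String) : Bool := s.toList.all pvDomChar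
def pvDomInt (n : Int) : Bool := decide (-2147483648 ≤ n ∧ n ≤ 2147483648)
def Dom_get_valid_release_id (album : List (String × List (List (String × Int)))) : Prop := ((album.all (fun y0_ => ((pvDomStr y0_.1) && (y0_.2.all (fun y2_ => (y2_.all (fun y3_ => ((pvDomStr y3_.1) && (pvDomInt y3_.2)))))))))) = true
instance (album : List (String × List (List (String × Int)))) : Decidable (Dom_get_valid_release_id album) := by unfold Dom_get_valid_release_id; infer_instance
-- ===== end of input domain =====

-- B merges A's two sequential scans into a single pass that tracks the first valid id as a fallback (same cost, simpler).

-- ===== PORT A =====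
-- first for-loop: first release with monitored truthy and id > 0
def pvScanMonitored : List (List (String × Int)) → Option Int
  | [] => none
  | rel :: rest =>
      if PySem.Dict.getD (PySem.Dict.mk rel) "monitored" 0 ≠ 0 ∧ PySem.Dict.getD (PySem.Dict.mk rel) "id" 0 > 0 then
        some (PySem.Dict.getD (PySem.Dict.mk rel) "id" 0)   -- rel["id"]; key present since rel.get("id",0) > 0
      else pvScanMonitored rest

-- second for-loop: first release with id > 0
def pvScanAny : List (List (String × Int)) → Option Int
  | [] => none
  | rel :: rest =>
      if PySem.Dict.getD (PySem.Dict.mk rel) "id" 0 > 0 then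
        some (PySem.Dict.getD (PySem.Dict.mk rel) "id" 0)
      else pvScanAny rest

def get_valid_release_id (album : List (String × List (List (String × Int)))) : Int :=
  let releases := PySem.Dict.getD (PySem.Dict.mk album) "releases" []
  if releases = [] then 0
  else
    match pvScanMonitored releases with
    | some v => v
    | none =>
      match pvScanAny releases with
      | some v => v
      | none => 0

-- ===== PORT B =====
def pvScanB (fallback : Int) : List (List (String × Int)) → Int
  | [] => fallback
  | rel :: rest =>
      let rid := PySem.Dict.getD (PySem.Dict.mk rel) "id" 0
      if PySem.Dict.getD (PySem.Dict.mk rel) "monitored" 0 ≠ 0 ∧ rid > 0 then rid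
      else pvScanB (if fallback = 0 ∧ rid > 0 then rid else fallback) rest

def get_valid_release_id_alt (album : List (String × List (List (String × Int)))) : Int :=
  pvScanB 0 (PySem.Dict.getD (PySem.Dict.mk album) "releases" [])

-- ===== PRECONDITION & SPEC =====
def Spec_get_valid_release_id (album : List (String × List (List (String × Int)))) (out : Int) : Prop := out = get_valid_release_id_alt album
instance (album : List (String × List (List (String × Int)))) (out : Int) : Decidable (Spec_get_valid_release_id album out) := by unfold Spec_get_valid_release_id; infer_instance

-- ===== CLAIM (what is proved, stated in full; the proofs are below) =====
def Claim_equal_get_valid_release_id : Prop := ∀ (album : List (String × List (List (String × Int)))), Dom_get_valid_release_id album → Spec_get_valid_release_id album (get_valid_release_id album)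

-- ===== LEMMAS AND PROOFS =====
lemma pvScanB_eq (f : Int) (rs : List (List (String × Int))) :
    pvScanB f rs =
      match pvScanMonitored rs with
      | some v => v
      | none => if f = 0 then (pvScanAny rs).getD 0 else f := by
  induction rs generalizing f with
  | nil => simp [pvScanB, pvScanMonitored, pvScanAny]
  | cons rel rest ih =>
    by_cases hm : PySem.Dict.getD (PySem.Dict.mk rel) "monitored" 0 ≠ 0 ∧ PySem.Dict.getD (PySem.Dict.mk rel) "id" 0 > 0
    · simp [pvScanB, pvScanMonitored, hm]
    · rw [pvScanB, pvScanMonitored, if_neg hm, if_neg hm, ih]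
      by_cases hid : PySem.Dict.getD (PySem.Dict.mk rel) "id" 0 > 0
      · by_cases hf : f = 0
        · have : ¬ (PySem.Dict.getD (PySem.Dict.mk rel) "id" 0 = 0) := by omega
          simp [pvScanAny, hid, hf, this]
        · simp [hid, hf]
      · simp [pvScanAny, hid]

-- ===== VERDICT (by name: the statement is the Claim_ definition above) =====
theorem get_valid_release_id_spec : Claim_equal_get_valid_release_id := by
  intro album _
  unfold Spec_get_valid_release_id get_valid_release_id get_valid_release_id_alt
  rw [pvScanB_eq]
  cases h : PySem.Dict.getD (PySem.Dict.mk album) "releases" [] with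
  | nil => simp [pvScanMonitored, pvScanAny]
  | cons r rest =>
    cases hM : pvScanMonitored (r :: rest) with
    | some v => simp [hM]
    | none => cases hA : pvScanAny (r :: rest) <;> simp [hM, hA]
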